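-- pv_equiv track=rewrite | github.com/abhishak3/CSES_problemset | 02.SearchingAndSorting/02.Apartments.py | apartments
-- ===== SOURCE A (Python) =====
-- def apartments(n, m, k, apartment, need):
--   apartment.sort()
--   need.sort()
--
--   j = 0
--   count = 0
--
--   for i in range(len(need)):
--     while j < len(apartment) and apartment[j] <= need[i] + k:
--       if abs(apartment[j] - need[i]) <= k:
--         count += 1
--         j += 1
--         break
--       j += 1
--
--   return count
-- ===== SOURCE B (Python) =====
-- def apartments(n, m, k, apartment, need):
--     apartment.sort()
--     need.sort()
--     j = 0
--     count = 0
--     for x in need: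
--         # binary-search (bisect_left with lo=j) the first unconsumed apartment >= x - k
--         lo, hi = j, len(apartment)
--         t = x - k
--         while lo < hi:
--             mid = (lo + hi) // 2
--             if apartment[mid] < t:
--                 lo = mid + 1
--             else:
--                 hi = mid
--         if lo < len(apartment) and apartment[lo] <= x + k:
--             count += 1
--             j = lo + 1
--         else:
--             j = lo
--     return count
-- ===== Notes on version B (the rewrite author's own statement) =====
-- stated objective: alternative
-- what changed: Replaces A's linear while-loop scan over apartments with a hand-written bisect_left binary search (with a low-water pointer) that finds the first unconsumed apartment >= need-k, then matches it if <= need+k.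
import Mathlib
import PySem

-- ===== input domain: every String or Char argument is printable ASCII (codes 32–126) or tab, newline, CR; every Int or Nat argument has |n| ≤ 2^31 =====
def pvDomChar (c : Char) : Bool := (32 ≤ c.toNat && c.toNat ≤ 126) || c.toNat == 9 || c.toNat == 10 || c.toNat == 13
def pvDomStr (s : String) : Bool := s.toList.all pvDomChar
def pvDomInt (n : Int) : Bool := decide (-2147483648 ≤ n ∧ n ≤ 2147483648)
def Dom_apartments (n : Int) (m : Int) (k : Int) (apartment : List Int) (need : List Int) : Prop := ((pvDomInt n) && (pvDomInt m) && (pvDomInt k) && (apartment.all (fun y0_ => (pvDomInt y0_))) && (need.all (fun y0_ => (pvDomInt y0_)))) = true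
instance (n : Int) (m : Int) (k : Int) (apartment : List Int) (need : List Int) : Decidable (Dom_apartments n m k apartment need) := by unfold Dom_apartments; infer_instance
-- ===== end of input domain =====

-- B replaces A's linear while-scan by a hand-written bisect_left binary search with a
-- low-water pointer (objective: alternative). Both Pythons sort `apartment` and `need`
-- in place; the equivalence proved here is about the RETURN value.

-- ===== PORT A =====
-- the inner `while j < len(apartment) and apartment[j] <= x + k: ...` loop of A
def apWhile (ap : List Int) (x k : Int) (j : Nat) (count : Int) : Nat × Int :=
  if _h : j < ap.length then
    if ap.getD j 0 ≤ x + k then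
      if |ap.getD j 0 - x| ≤ k then (j + 1, count + 1)
      else apWhile ap x k (j + 1) count
    else (j, count)
  else (j, count)
termination_by ap.length - j

def apartments (n : Int) (m : Int) (k : Int) (apartment : List Int) (need : List Int) : Int :=
  let ap := PySem.List.sorted apartment (fun v => v) false
  let nd := PySem.List.sorted need (fun v => v) false
  (nd.foldl (fun st x => apWhile ap x k st.1 st.2) (0, 0)).2

-- ===== PORT B =====
-- hand-written bisect_left of Source B (indices always in range in Python; getD is exact there)
def bisectLeft (ap : List Int) (t : Int) (lo hi : Nat) : Nat :=
  if _h : lo < hi then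
    let mid := (lo + hi) / 2
    if ap.getD mid 0 < t then bisectLeft ap t (mid + 1) hi
    else bisectLeft ap t lo mid
  else lo
termination_by hi - lo
decreasing_by
  · omega
  · omega

-- one iteration of Source B's `for x in need` loop
def bStep (ap : List Int) (k : Int) (st : Nat × Int) (x : Int) : Nat × Int :=
  let lo := bisectLeft ap (x - k) st.1 ap.length
  if lo < ap.length ∧ ap.getD lo 0 ≤ x + k then (lo + 1, st.2 + 1) else (lo, st.2)

def apartments_alt (n : Int) (m : Int) (k : Int) (apartment : List Int) (need : List Int) : Int :=
  let ap := PySem.List.sorted apartment (fun v => v) false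
  let nd := PySem.List.sorted need (fun v => v) false
  (nd.foldl (bStep ap k) (0, 0)).2

-- ===== PRECONDITION & SPEC =====
def Spec_apartments (n : Int) (m : Int) (k : Int) (apartment : List Int) (need : List Int) (out : Int) : Prop := out = apartments_alt n m k apartment need
instance (n : Int) (m : Int) (k : Int) (apartment : List Int) (need : List Int) (out : Int) : Decidable (Spec_apartments n m k apartment need out) := by unfold Spec_apartments; infer_instance

-- ===== CLAIM (what is proved, stated in full; the proofs are below) =====
def Claim_equal_apartments : Prop := ∀ (n : Int) (m : Int) (k : Int) (apartment : List Int) (need : List Int), Dom_apartments n m k apartment need → Spec_apartments n m k apartment need (apartments n m k apartment need)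

-- ===== LEMMAS AND PROOFS =====

-- linear "skip all entries < t" scan, mediating between A's while-loop and B's binary search
def skipC (ap : List Int) (t : Int) (j hi : Nat) : Nat :=
  if _h : j < hi then
    if ap.getD j 0 < t then skipC ap t (j + 1) hi else j
  else j
termination_by hi - j

theorem skipC_congr (ap : List Int) (t : Int) (hi : Nat) :
    ∀ d lo, lo + d ≤ hi → (∀ i, lo ≤ i → i < lo + d → ap.getD i 0 < t) →
      skipC ap t lo hi = skipC ap t (lo + d) hi := by
  intro d
  induction d with
  | zero => intro lo _ _; rfl
  | succ d ih =>
    intro lo hle hall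
    have hlt : lo < hi := by omega
    rw [skipC, dif_pos hlt, if_pos (hall lo le_rfl (by omega))]
    have := ih (lo + 1) (by omega) (fun i h1 h2 => hall i (by omega) (by omega))
    rw [this]
    congr 1
    omega

theorem skipC_cap (ap : List Int) (t : Int) (hi hi' : Nat)
    (hle : hi' ≤ hi) (h : ∀ i, hi' ≤ i → i < hi → t ≤ ap.getD i 0) :
    ∀ lo, skipC ap t lo hi = skipC ap t lo hi' := by
  suffices H : ∀ n lo, hi' - lo ≤ n → skipC ap t lo hi = skipC ap t lo hi' by
    intro lo; exact H (hi' - lo) lo le_rfl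
  intro n
  induction n with
  | zero =>
    intro lo hn
    have hlo : hi' ≤ lo := by omega
    have rhs : skipC ap t lo hi' = lo := by rw [skipC, dif_neg (by omega)]
    rw [rhs, skipC]
    by_cases hlt : lo < hi
    · rw [dif_pos hlt, if_neg (not_lt.mpr (h lo hlo hlt))]
    · rw [dif_neg hlt]
  | succ n ih =>
    intro lo hn
    by_cases hlt : lo < hi'
    · conv_lhs => rw [skipC]
      conv_rhs => rw [skipC]
      rw [dif_pos (by omega : lo < hi), dif_pos hlt]
      by_cases hc : ap.getD lo 0 < t
      · rw [if_pos hc, if_pos hc]; exact ih (lo + 1) (by omega)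
      · rw [if_neg hc, if_neg hc]
    · exact (ih lo (by omega))

theorem skipC_ge (ap : List Int) (t : Int) :
    ∀ lo hi, skipC ap t lo hi < hi → t ≤ ap.getD (skipC ap t lo hi) 0 := by
  suffices H : ∀ n lo hi, hi - lo ≤ n → skipC ap t lo hi < hi →
      t ≤ ap.getD (skipC ap t lo hi) 0 by
    intro lo hi; exact H (hi - lo) lo hi le_rfl
  intro n
  induction n with
  | zero =>
    intro lo hi hn hlt
    rw [skipC, dif_neg (by omega)] at hlt ⊢
    omega
  | succ n ih =>
    intro lo hi hn hlt
    by_cases hj : lo < hi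
    · by_cases hc : ap.getD lo 0 < t
      · rw [skipC, dif_pos hj, if_pos hc] at hlt ⊢
        exact ih (lo + 1) hi (by omega) hlt
      · rw [skipC, dif_pos hj, if_neg hc] at hlt ⊢
        omega
    · rw [skipC, dif_neg hj] at hlt; omega

theorem bisect_eq_skip (ap : List Int) (t : Int)
    (hmono : ∀ p q, p ≤ q → q < ap.length → ap.getD p 0 ≤ ap.getD q 0) :
    ∀ lo hi, hi ≤ ap.length → bisectLeft ap t lo hi = skipC ap t lo hi := by
  suffices H : ∀ n lo hi, hi - lo ≤ n → hi ≤ ap.length →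
      bisectLeft ap t lo hi = skipC ap t lo hi by
    intro lo hi; exact H (hi - lo) lo hi le_rfl
  intro n
  induction n with
  | zero =>
    intro lo hi hn hlen
    rw [bisectLeft, skipC, dif_neg (by omega), dif_neg (by omega)]
  | succ n ih =>
    intro lo hi hn hlen
    by_cases hlt : lo < hi
    · rw [bisectLeft, dif_pos hlt]
      set mid := (lo + hi) / 2 with hmid
      have h1 : lo ≤ mid := by omega
      have h2 : mid < hi := by omega
      by_cases hc : ap.getD mid 0 < t
      · rw [if_pos hc, ih (mid + 1) hi (by omega) hlen]
        have hcongr := skipC_congr ap t hi (mid + 1 - lo) lo (by omega)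
          (fun i hi1 hi2 =>
            lt_of_le_of_lt (hmono i mid (by omega) (by omega)) hc)
        rw [hcongr]
        congr 1
        omega
      · rw [if_neg hc, ih lo mid (by omega) (by omega)]
        exact (skipC_cap ap t hi mid (by omega)
          (fun i hi1 hi2 =>
            le_trans (not_lt.mp hc) (hmono mid i hi1 (by omega))) lo).symm
    · exact ih lo hi (by omega) hlen

theorem apWhile_eq (ap : List Int) (x k : Int) (hk : 0 ≤ k) :
    ∀ j count, apWhile ap x k j count =
      (if skipC ap (x - k) j ap.length < ap.length ∧
          ap.getD (skipC ap (x - k) j ap.length) 0 ≤ x + k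
       then (skipC ap (x - k) j ap.length + 1, count + 1)
       else (skipC ap (x - k) j ap.length, count)) := by
  suffices H : ∀ n j count, ap.length - j ≤ n → apWhile ap x k j count =
      (if skipC ap (x - k) j ap.length < ap.length ∧
          ap.getD (skipC ap (x - k) j ap.length) 0 ≤ x + k
       then (skipC ap (x - k) j ap.length + 1, count + 1)
       else (skipC ap (x - k) j ap.length, count)) by
    intro j count; exact H (ap.length - j) j count le_rfl
  intro n
  induction n with
  | zero =>
    intro j count hn
    have hj : ¬ j < ap.length := by omega
    rw [apWhile, dif_neg hj, skipC, dif_neg hj, if_neg (by omega)]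
  | succ n ih =>
    intro j count hn
    by_cases hj : j < ap.length
    · rw [apWhile, dif_pos hj]
      by_cases h1 : ap.getD j 0 ≤ x + k
      · by_cases h2 : |ap.getD j 0 - x| ≤ k
        · rw [if_pos h1, if_pos h2]
          have habs := abs_le.mp h2
          have hs : skipC ap (x - k) j ap.length = j := by
            rw [skipC, dif_pos hj, if_neg (by omega)]
          rw [hs, if_pos ⟨hj, h1⟩]
        · rw [if_pos h1, if_neg h2]
          have habs : ¬ |ap.getD j 0 - x| ≤ k := h2
          rw [abs_le, not_and_or, not_le, not_le] at habs
          have hlt : ap.getD j 0 < x - k := by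
            rcases habs with h | h <;> omega
          have hs : skipC ap (x - k) j ap.length =
              skipC ap (x - k) (j + 1) ap.length := by
            rw [skipC, dif_pos hj, if_pos hlt]
          rw [hs]
          exact ih (j + 1) count (by omega)
      · rw [if_neg h1]
        have hs : skipC ap (x - k) j ap.length = j := by
          rw [skipC, dif_pos hj, if_neg (by omega)]
        rw [hs, if_neg (by tauto)]
    · rw [apWhile, dif_neg hj, skipC, dif_neg hj, if_neg (by omega)]

theorem apWhile_count_neg (ap : List Int) (x k : Int) (hk : k < 0) :
    ∀ j count, (apWhile ap x k j count).2 = count := by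
  suffices H : ∀ n j count, ap.length - j ≤ n → (apWhile ap x k j count).2 = count by
    intro j count; exact H (ap.length - j) j count le_rfl
  intro n
  induction n with
  | zero =>
    intro j count hn
    rw [apWhile, dif_neg (by omega)]
  | succ n ih =>
    intro j count hn
    by_cases hj : j < ap.length
    · rw [apWhile, dif_pos hj]
      by_cases h1 : ap.getD j 0 ≤ x + k
      · rw [if_pos h1]
        have h2 : ¬ |ap.getD j 0 - x| ≤ k := by
          intro h; have := abs_nonneg (ap.getD j 0 - x); omega
        rw [if_neg h2]
        exact ih (j + 1) count (by omega)
      · rw [if_neg h1]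
    · rw [apWhile, dif_neg hj]

theorem foldl_ext' {α β : Type} (f g : β → α → β) (h : ∀ b a, f b a = g b a) :
    ∀ (l : List α) (init : β), l.foldl f init = l.foldl g init := by
  intro l
  induction l with
  | nil => intro init; rfl
  | cons a l ih => intro init; simp only [List.foldl_cons, h]; exact ih _

theorem foldl_count_const {α : Type} (f : Nat × Int → α → Nat × Int)
    (h : ∀ st a, (f st a).2 = st.2) :
    ∀ (l : List α) (st : Nat × Int), (l.foldl f st).2 = st.2 := by
  intro l
  induction l with
  | nil => intro st; rfl
  | cons a l ih => intro st; rw [List.foldl_cons, ih, h]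

-- ===== VERDICT (by name: the statement is the Claim_ definition above) =====
theorem apartments_spec : Claim_equal_apartments := by
  intro n m k apartment need _
  show _ = _
  unfold apartments apartments_alt
  set ap := PySem.List.sorted apartment (fun v => v) false with hap
  have hmono : ∀ p q, p ≤ q → q < ap.length → ap.getD p 0 ≤ ap.getD q 0 := by
    intro p q hpq hq
    have hp : p < ap.length := lt_of_le_of_lt hpq hq
    rw [List.getD_eq_getElem _ _ hp, List.getD_eq_getElem _ _ hq]
    exact PySem.List.sorted_id_getElem_mono apartment hpq hq
  by_cases hk : 0 ≤ k
  · refine congrArg Prod.snd (foldl_ext' _ _ ?_ _ _)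
    intro st x
    rw [apWhile_eq ap x k hk st.1 st.2]
    unfold bStep
    rw [bisect_eq_skip ap (x - k) hmono st.1 ap.length le_rfl]
  · have hk' : k < 0 := by omega
    rw [foldl_count_const _ (fun st x => apWhile_count_neg ap x k hk' st.1 st.2),
      foldl_count_const]
    intro st x
    unfold bStep
    rw [bisect_eq_skip ap (x - k) hmono st.1 ap.length le_rfl]
    have : ¬ (skipC ap (x - k) st.1 ap.length < ap.length ∧
        ap.getD (skipC ap (x - k) st.1 ap.length) 0 ≤ x + k) := by
      rintro ⟨h1, h2⟩
      have := skipC_ge ap (x - k) st.1 ap.length h1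
      omega
    rw [if_neg this]
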